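-- pv_equiv track=rewrite | github.com/liuxiansheng0501/WindFarmKPI | controler/wtgs_power.py | realPower
-- ===== SOURCE A (Python) =====
-- def realPower(powerList):
--     while True:
--         if max(powerList) - min(powerList)>55000:
--             powerList.remove(min(powerList))
--             continue
--         else:
--             break
--     return max(powerList) - min(powerList)
-- ===== SOURCE B (Python) =====
-- def realPower(powerList):
--     M = max(powerList)
--     lo = M - 55000
--     m = min(x for x in powerList if x >= lo)
--     return M - m
-- ===== Notes on version B (the rewrite author's own statement) =====
-- stated objective: faster
-- what changed: Instead of repeatedly scanning for and removing the minimum until the range fits, B notes the maximum never changes, so the answer is max minus the smallest element >= max-55000, found in one pass over the list.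
import Mathlib
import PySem

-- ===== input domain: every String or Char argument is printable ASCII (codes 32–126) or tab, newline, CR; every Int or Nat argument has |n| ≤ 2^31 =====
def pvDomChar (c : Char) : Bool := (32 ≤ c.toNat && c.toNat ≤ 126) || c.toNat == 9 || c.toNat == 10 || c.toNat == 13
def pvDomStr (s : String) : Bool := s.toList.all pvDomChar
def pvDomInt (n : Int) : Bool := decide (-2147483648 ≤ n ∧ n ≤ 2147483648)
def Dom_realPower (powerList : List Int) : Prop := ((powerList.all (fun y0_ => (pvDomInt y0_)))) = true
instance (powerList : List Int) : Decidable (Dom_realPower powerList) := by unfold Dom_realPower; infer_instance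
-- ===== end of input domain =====

-- B replaces A's repeated remove-the-minimum loop by a single closed-form pass (max is never
-- removed, so the answer is max − smallest element ≥ max−55000); equivalence is about the RETURN
-- value only — Python A mutates its argument in place (list.remove), B does not.

-- ===== PORT A =====
-- while True: if max-min>55000 remove first occurrence of min and continue, else break
def realPowerLoop (l : List Int) : List Int :=
  match hM : PySem.List.max? l (fun x => x), hm : PySem.List.min? l (fun x => x) with
  | some M, some m =>
    if M - m > 55000 then
      realPowerLoop ((PySem.List.remove? l m).getD l)   -- remove? is always `some` here: the min is in the list
    else l
  | _, _ => l              -- unreachable under Pre_ (empty list: Python raises)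
termination_by l.length
decreasing_by
  have hmem : m ∈ l := PySem.List.min?_mem hm
  rw [PySem.List.remove?_eq_some_erase l m hmem, Option.getD_some]
  have h1 := List.length_erase_of_mem hmem
  have h2 := List.length_pos_of_mem hmem
  omega

def realPower (powerList : List Int) : Int :=
  let fin := realPowerLoop powerList
  match PySem.List.max? fin (fun x => x), PySem.List.min? fin (fun x => x) with
  | some M, some m => M - m
  | _, _ => 0              -- unreachable under Pre_

-- ===== PORT B =====
def realPower_alt (powerList : List Int) : Int :=
  match PySem.List.max? powerList (fun x => x) with
  | some M =>
    match PySem.List.min? (powerList.filter (fun x => decide (M - 55000 ≤ x))) (fun x => x) with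
    | some m => M - m
    | none => 0            -- unreachable: M itself passes the filter
  | none => 0              -- unreachable under Pre_

-- ===== PRECONDITION & SPEC =====
-- Pre_ excludes only the empty list, on which Python's max() raises ValueError (in both A and B).
def Pre_realPower (powerList : List Int) : Prop := powerList ≠ []
instance (powerList : List Int) : Decidable (Pre_realPower powerList) := by unfold Pre_realPower; infer_instance
def pvWitness_realPower : List Int := [100000, 1, 70000]

def Spec_realPower (powerList : List Int) (out : Int) : Prop := out = realPower_alt powerList
instance (powerList : List Int) (out : Int) : Decidable (Spec_realPower powerList out) := by unfold Spec_realPower; infer_instance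

-- ===== CLAIM (what is proved, stated in full; the proofs are below) =====
def Claim_equal_realPower : Prop := ∀ (powerList : List Int), Dom_realPower powerList → Pre_realPower powerList → Spec_realPower powerList (realPower powerList)

-- ===== LEMMAS AND PROOFS =====

-- max? = some M from membership + upper bound (value-level characterisation)
theorem max?_eq_of_isMax {l : List Int} {M : Int} (h1 : M ∈ l) (h2 : ∀ y ∈ l, y ≤ M) :
    PySem.List.max? l (fun x => x) = some M := by
  cases hv : PySem.List.max? l (fun x => x) with
  | none =>
      rw [PySem.List.max?_eq_none_iff l (fun x => x)] at hv
      simp [hv] at h1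
  | some v =>
      have hvl : v ∈ l := PySem.List.max?_mem hv
      have h3 : M ≤ v := PySem.List.max?_isMax hv M h1
      have h4 : v ≤ M := h2 v hvl
      rw [le_antisymm h4 h3]

-- filtering is unchanged by erasing an element the predicate rejects
theorem filter_erase_of_neg {p : Int → Bool} {v : Int} (hp : p v = false) :
    ∀ (l : List Int), (l.erase v).filter p = l.filter p := by
  intro l
  induction l with
  | nil => simp
  | cons x xs ih =>
      by_cases hx : x = v
      · subst hx; simp [List.erase_cons_head, hp]
      · rw [List.erase_cons_tail (by simp [hx])]
        simp only [List.filter_cons, ih]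

-- the loop invariant: the max is preserved, and the final min is the min of the
-- elements ≥ max − 55000 of the original list
theorem loop_char : ∀ (l : List Int) (M : Int),
    PySem.List.max? l (fun x => x) = some M →
    PySem.List.max? (realPowerLoop l) (fun x => x) = some M ∧
    PySem.List.min? (realPowerLoop l) (fun x => x)
      = PySem.List.min? (l.filter (fun x => decide (M - 55000 ≤ x))) (fun x => x) := by
  intro l
  induction l using (measure List.length).wf.induction with
  | _ l ih =>
  intro M hM
  have hne : l ≠ [] := by
    intro h; rw [h, (PySem.List.max?_eq_none_iff ([]:List Int) (fun x => x)).mpr rfl] at hM; simp at hM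
  obtain ⟨m, hm⟩ : ∃ m, PySem.List.min? l (fun x => x) = some m := by
    cases hv : PySem.List.min? l (fun x => x) with
    | none => exact absurd ((PySem.List.min?_eq_none_iff l (fun x => x)).mp hv) hne
    | some v => exact ⟨v, rfl⟩
  rw [realPowerLoop]
  rw [hM, hm]
  by_cases hgt : M - m > 55000
  · -- remove the min and recurse
    have hmmem : m ∈ l := PySem.List.min?_mem hm
    have hrem : PySem.List.remove? l m = some (l.erase m) :=
      PySem.List.remove?_eq_some_erase l m hmmem
    simp only [hgt, if_true, hrem, Option.getD_some]
    have hMm : M ≠ m := by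
      intro h; rw [h] at hgt; omega
    have hMmem : M ∈ l := PySem.List.max?_mem hM
    have hMe : M ∈ l.erase m := (List.mem_erase_of_ne hMm).mpr hMmem
    have hMax' : PySem.List.max? (l.erase m) (fun x => x) = some M := by
      refine max?_eq_of_isMax hMe (fun y hy => ?_)
      exact PySem.List.max?_isMax hM y (List.mem_of_mem_erase hy)
    have hlt : (l.erase m).length < l.length := by
      have h1 := List.length_erase_of_mem hmmem
      have h2 := List.length_pos_of_mem hmmem
      omega
    obtain ⟨ih1, ih2⟩ := ih (l.erase m) hlt M hMax'
    refine ⟨ih1, ?_⟩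
    rw [ih2, filter_erase_of_neg (by simp; omega)]
  · -- the range fits: the loop stops, and every element passes the filter
    simp only [hgt, if_false]
    have hfilt : l.filter (fun x => decide (M - 55000 ≤ x)) = l := by
      rw [List.filter_eq_self]
      intro a ha
      have := PySem.List.min?_isMin hm a ha
      simp only [decide_eq_true_eq]
      omega
    exact ⟨hM, by rw [hfilt, hm]⟩

-- ===== VERDICT (by name: the statement is the Claim_ definition above) =====
theorem realPower_spec : Claim_equal_realPower := by
  intro l _ hpre
  unfold Spec_realPower realPower realPower_alt
  obtain ⟨M, hM⟩ : ∃ M, PySem.List.max? l (fun x => x) = some M := by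
    cases hv : PySem.List.max? l (fun x => x) with
    | none => exact absurd ((PySem.List.max?_eq_none_iff l (fun x => x)).mp hv) hpre
    | some v => exact ⟨v, rfl⟩
  obtain ⟨h1, h2⟩ := loop_char l M hM
  have hMf : M ∈ l.filter (fun x => decide (M - 55000 ≤ x)) := by
    rw [List.mem_filter]
    exact ⟨PySem.List.max?_mem hM, by simp⟩
  obtain ⟨m, hmf⟩ : ∃ m, PySem.List.min? (l.filter (fun x => decide (M - 55000 ≤ x))) (fun x => x) = some m := by
    cases hv : PySem.List.min? (l.filter (fun x => decide (M - 55000 ≤ x))) (fun x => x) with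
    | none =>
        rw [PySem.List.min?_eq_none_iff _ (fun x => x)] at hv
        rw [hv] at hMf; exact absurd hMf (List.not_mem_nil)
    | some v => exact ⟨v, rfl⟩
  rw [hM]
  simp only [h1, h2, hmf]
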